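-- pv_equiv track=rewrite | github.com/happr/Unilever_MTM_RecipeNLP_2021 | en/lambda_function.py | name_cat
-- ===== SOURCE A (Python) =====
-- def name_cat(name,bakery,chilled,beverages, dairy, fruit,grains,herbs,meat,nuts,pantry):
--   for a in bakery:
--     if a in name and len(a)>0:
--       return 0
--
--   for a in chilled:
--     if a in name and len(a)>0:
--       return 1
--
--   for a in beverages:
--     if a in name and len(a)>0:
--       return 2
--
--   for a in dairy:
--     if a in name and len(a)>0:
--       return 3
--
--   for a in fruit:
--     if a in name and len(a)>0:
--       return 4
--
--   for a in grains:
--     if a in name and len(a)>0: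
--       return 5
--
--   for a in herbs:
--     if a in name and len(a)>0:
--       return 6
--
--   for a in meat:
--     if a in name and len(a)>0:
--       return 7
--
--   for a in nuts:
--     if a in name and len(a)>0:
--       return 8
--
--   for a in pantry:
--     if a in name and len(a)>0:
--       return 9
--
--   return 10
-- ===== SOURCE B (Python) =====
-- def name_cat(name, bakery, chilled, beverages, dairy, fruit, grains, herbs, meat, nuts, pantry):
--     # Index the substrings of `name` whose lengths occur among the patterns, once;
--     # each pattern is then a single set lookup.
--     cats = (bakery, chilled, beverages, dairy, fruit, grains, herbs, meat, nuts, pantry)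
--     lengths = set()
--     for cat in cats:
--         for w in cat:
--             if len(w) > 0:
--                 lengths.add(len(w))
--     n = len(name)
--     subs = set()
--     for L in lengths:
--         for i in range(n - L + 1):
--             subs.add(name[i:i + L])
--     for k, cat in enumerate(cats):
--         for w in cat:
--             if len(w) > 0 and w in subs:
--                 return k
--     return 10
-- ===== Notes on version B (the rewrite author's own statement) =====
-- stated objective: alternative
-- what changed: B builds, once, a set of the substrings of name whose lengths occur among the (nonempty) patterns and scans the ten category lists as one enumerated sequence with O(1) set lookups, replacing A's ten unrolled loops that each run a substring search per pattern.
import Mathlib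
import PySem

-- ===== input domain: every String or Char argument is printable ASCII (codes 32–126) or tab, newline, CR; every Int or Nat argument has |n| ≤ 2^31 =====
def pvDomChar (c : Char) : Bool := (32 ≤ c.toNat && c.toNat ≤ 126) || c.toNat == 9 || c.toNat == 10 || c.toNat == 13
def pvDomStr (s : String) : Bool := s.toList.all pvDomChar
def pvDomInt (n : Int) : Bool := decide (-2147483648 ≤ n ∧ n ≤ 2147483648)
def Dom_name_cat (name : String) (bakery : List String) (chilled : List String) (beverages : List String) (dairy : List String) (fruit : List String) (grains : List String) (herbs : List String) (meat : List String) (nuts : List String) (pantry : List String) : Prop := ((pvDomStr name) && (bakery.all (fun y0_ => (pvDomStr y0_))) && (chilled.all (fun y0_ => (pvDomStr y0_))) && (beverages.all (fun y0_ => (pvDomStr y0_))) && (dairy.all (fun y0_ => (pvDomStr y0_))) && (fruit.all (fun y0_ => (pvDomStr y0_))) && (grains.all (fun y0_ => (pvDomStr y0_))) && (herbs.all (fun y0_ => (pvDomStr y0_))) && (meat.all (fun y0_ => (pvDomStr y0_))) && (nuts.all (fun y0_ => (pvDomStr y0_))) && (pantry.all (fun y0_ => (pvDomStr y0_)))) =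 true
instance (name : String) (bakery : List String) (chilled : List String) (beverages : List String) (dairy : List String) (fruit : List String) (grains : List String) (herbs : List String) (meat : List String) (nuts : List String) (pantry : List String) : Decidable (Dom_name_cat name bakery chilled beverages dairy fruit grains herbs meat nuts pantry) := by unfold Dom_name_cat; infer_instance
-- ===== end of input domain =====

-- B indexes, once, the substrings of `name` whose lengths occur among the patterns,
-- so each pattern check is a single set lookup; return value proved equal on Dom.
-- ===== PORT A =====
-- loop 'for a in cat: if a in name and len(a)>0: return k' — the scan over one category
def pvScanA (name : String) : List String → Bool
  | [] => false
  | a :: rest =>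
      if PySem.Str.isIn a name && decide (0 < PySem.Str.len a) then true
      else pvScanA name rest

def name_cat (name : String) (bakery : List String) (chilled : List String) (beverages : List String) (dairy : List String) (fruit : List String) (grains : List String) (herbs : List String) (meat : List String) (nuts : List String) (pantry : List String) : Int :=
  if pvScanA name bakery then 0
  else if pvScanA name chilled then 1
  else if pvScanA name beverages then 2
  else if pvScanA name dairy then 3
  else if pvScanA name fruit then 4
  else if pvScanA name grains then 5
  else if pvScanA name herbs then 6
  else if pvScanA name meat then 7
  else if pvScanA name nuts then 8
  else if pvScanA name pantry then 9
  else 10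

-- ===== PORT B =====
-- lengths = {len(w) for cat in cats for w in cat if len(w) > 0}
def pvLens (cats : List (List String)) : PySem.Set Int :=
  cats.foldl
    (fun s cat => cat.foldl
      (fun s w => if 0 < PySem.Str.len w then PySem.Set.add s (PySem.Str.len w) else s) s)
    PySem.Set.empty

-- subs = {name[i:i+L] for L in lengths for i in range(n - L + 1)}
def pvSubs (name : String) (lens : PySem.Set Int) : PySem.Set String :=
  lens.foldl
    (fun s L =>
      (PySem.List.pyRange 0 (PySem.Str.len name - L + 1) 1).foldl
        (fun s i => PySem.Set.add s (PySem.Str.slice name (some i) (some (i + L)))) s)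
    PySem.Set.empty

-- inner loop: 'for w in cat: if len(w) > 0 and w in subs: return k'
def pvScanB (subs : PySem.Set String) : List String → Bool
  | [] => false
  | w :: rest =>
      if decide (0 < PySem.Str.len w) && PySem.Set.contains subs w then true
      else pvScanB subs rest

-- outer loop: 'for k, cat in enumerate(cats): …' then 'return 10'
def pvCatLoop (subs : PySem.Set String) : Int → List (List String) → Int
  | _, [] => 10
  | k, c :: rest => if pvScanB subs c then k else pvCatLoop subs (k + 1) rest

def name_cat_alt (name : String) (bakery : List String) (chilled : List String) (beverages : List String) (dairy : List String) (fruit : List String) (grains : List String) (herbs : List String) (meat : List String) (nuts : List String) (pantry : List String) : Int :=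
  let cats := [bakery, chilled, beverages, dairy, fruit, grains, herbs, meat, nuts, pantry]
  pvCatLoop (pvSubs name (pvLens cats)) 0 cats

-- ===== PRECONDITION & SPEC =====
def Spec_name_cat (name : String) (bakery : List String) (chilled : List String) (beverages : List String) (dairy : List String) (fruit : List String) (grains : List String) (herbs : List String) (meat : List String) (nuts : List String) (pantry : List String) (out : Int) : Prop := out = name_cat_alt name bakery chilled beverages dairy fruit grains herbs meat nuts pantry
instance (name : String) (bakery : List String) (chilled : List String) (beverages : List String) (dairy : List String) (fruit : List String) (grains : List String) (herbs : List String) (meat : List String) (nuts : List String) (pantry : List String) (out : Int) : Decidable (Spec_name_cat name bakery chilled beverages dairy fruit grains herbs meat nuts pantry out) := by unfold Spec_name_cat; infer_instance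

-- ===== CLAIM (what is proved, stated in full; the proofs are below) =====
def Claim_equal_name_cat : Prop := ∀ (name : String) (bakery : List String) (chilled : List String) (beverages : List String) (dairy : List String) (fruit : List String) (grains : List String) (herbs : List String) (meat : List String) (nuts : List String) (pantry : List String), Dom_name_cat name bakery chilled beverages dairy fruit grains herbs meat nuts pantry → Spec_name_cat name bakery chilled beverages dairy fruit grains herbs meat nuts pantry (name_cat name bakery chilled beverages dairy fruit grains herbs meat nuts pantry)

-- ===== LEMMAS AND PROOFS =====
-- membership in a fold of a 'step' whose membership adds exactly P i
theorem pv_mem_foldl_step {σ ι α : Type} (mem : σ → α → Prop)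
    (step : σ → ι → σ) (P : ι → α → Prop)
    (h : ∀ s i x, mem (step s i) x ↔ mem s x ∨ P i x) :
    ∀ (l : List ι) (s0 : σ) (x : α),
      mem (l.foldl step s0) x ↔ mem s0 x ∨ ∃ i ∈ l, P i x := by
  intro l
  induction l with
  | nil => intro s0 x; simp
  | cons a t ih =>
      intro s0 x
      simp only [List.foldl_cons, ih, h, List.mem_cons]
      constructor
      · rintro ((hs | hp) | ⟨i, hi, hp⟩)
        · exact Or.inl hs
        · exact Or.inr ⟨a, Or.inl rfl, hp⟩
        · exact Or.inr ⟨i, Or.inr hi, hp⟩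
      · rintro (hs | ⟨i, (rfl | hi), hp⟩)
        · exact Or.inl (Or.inl hs)
        · exact Or.inl (Or.inr hp)
        · exact Or.inr ⟨i, hi, hp⟩

theorem pv_mem_lens (cats : List (List String)) (L : Int) :
    L ∈ pvLens cats ↔
      ∃ cat ∈ cats, ∃ w ∈ cat, 0 < PySem.Str.len w ∧ L = PySem.Str.len w := by
  have inner : ∀ (s0 : PySem.Set Int) (cat : List String) (y : Int),
      y ∈ cat.foldl
          (fun s w => if 0 < PySem.Str.len w then PySem.Set.add s (PySem.Str.len w) else s) s0 ↔
        y ∈ s0 ∨ ∃ w ∈ cat, 0 < PySem.Str.len w ∧ y = PySem.Str.len w := by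
    intro s0 cat y
    refine pv_mem_foldl_step (fun s y => y ∈ s) _
      (fun w y => 0 < PySem.Str.len w ∧ y = PySem.Str.len w) ?_ cat s0 y
    intro s w y
    split_ifs with hw
    · simp only [PySem.Set.mem_add]; tauto
    · tauto
  have outer := pv_mem_foldl_step (fun s y => y ∈ s)
      (fun s cat => cat.foldl
        (fun s w => if 0 < PySem.Str.len w then PySem.Set.add s (PySem.Str.len w) else s) s)
      (fun cat y => ∃ w ∈ cat, 0 < PySem.Str.len w ∧ y = PySem.Str.len w)
      (fun s cat y => inner s cat y) cats PySem.Set.empty L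
  unfold pvLens
  rw [outer]
  simp only [PySem.Set.empty, List.not_mem_nil, false_or]

theorem pv_mem_subs (name : String) (lens : PySem.Set Int) (x : String) :
    x ∈ pvSubs name lens ↔
      ∃ L ∈ (lens : List Int), ∃ i : Int, 0 ≤ i ∧ i < PySem.Str.len name - L + 1 ∧
          x = PySem.Str.slice name (some i) (some (i + L)) := by
  have inner : ∀ (L : Int) (s0 : PySem.Set String) (y : String),
      y ∈ (PySem.List.pyRange 0 (PySem.Str.len name - L + 1) 1).foldl
            (fun s i => PySem.Set.add s (PySem.Str.slice name (some i) (some (i + L)))) s0 ↔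
        y ∈ s0 ∨ ∃ i ∈ PySem.List.pyRange 0 (PySem.Str.len name - L + 1) 1,
          y = PySem.Str.slice name (some i) (some (i + L)) := by
    intro L s0 y
    exact pv_mem_foldl_step (fun s y => y ∈ s)
      (fun s i => PySem.Set.add s (PySem.Str.slice name (some i) (some (i + L))))
      (fun i y => y = PySem.Str.slice name (some i) (some (i + L)))
      (fun s i y => PySem.Set.mem_add s _ y) _ s0 y
  have outer := pv_mem_foldl_step (fun s y => y ∈ s)
      (fun s L => (PySem.List.pyRange 0 (PySem.Str.len name - L + 1) 1).foldl
        (fun s i => PySem.Set.add s (PySem.Str.slice name (some i) (some (i + L)))) s)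
      (fun L y => ∃ i ∈ PySem.List.pyRange 0 (PySem.Str.len name - L + 1) 1,
          y = PySem.Str.slice name (some i) (some (i + L)))
      (fun s L y => inner L s y) lens PySem.Set.empty x
  unfold pvSubs
  rw [outer]
  simp only [PySem.Set.empty, List.not_mem_nil, false_or, PySem.List.mem_pyRange_one]
  constructor
  · rintro ⟨L, hL, i, ⟨h0, hi⟩, rfl⟩
    exact ⟨L, hL, i, h0, hi, rfl⟩
  · rintro ⟨L, hL, i, h0, hi, rfl⟩
    exact ⟨L, hL, i, ⟨h0, hi⟩, rfl⟩

theorem pv_contains_subs (name : String) (lens : PySem.Set Int) (w : String)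
    (hpos : ∀ L ∈ (lens : List Int), 0 < L)
    (hw : 0 < PySem.Str.len w) (hmem : PySem.Str.len w ∈ (lens : List Int)) :
    PySem.Set.contains (pvSubs name lens) w = PySem.Str.isIn w name := by
  rw [Bool.eq_iff_iff, PySem.Set.contains_iff, PySem.Str.isIn_iff_infix, pv_mem_subs]
  have hlen : PySem.Str.len name = (name.toList.length : Int) := PySem.Str.len_eq name
  constructor
  · rintro ⟨L, hL, i, h0, hi, rfl⟩
    have hLpos := hpos L hL
    rw [PySem.Str.toList_slice]
    show PySem.List.slice name.toList (some i) (some (i + L)) <:+: name.toList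
    rw [PySem.List.slice_of_nonneg name.toList h0 (by omega) (by omega) (by omega)]
    exact ((List.take_prefix _ _).isInfix).trans ((List.drop_suffix _ _).isInfix)
  · rintro ⟨s, t, hst⟩
    have hwlen : PySem.Str.len w = (w.toList.length : Int) := PySem.Str.len_eq w
    have h2 : s.length + (w.toList.length + t.length) = name.toList.length := by
      have h3 := congrArg List.length hst
      simp only [List.length_append] at h3
      omega
    refine ⟨PySem.Str.len w, hmem, (s.length : Int), by positivity, by omega, ?_⟩
    rw [← String.toList_inj, PySem.Str.toList_slice, hwlen]
    show w.toList = PySem.List.slice name.toList _ _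
    rw [PySem.List.slice_natCast_add name.toList s.length w.toList.length, ← hst,
      List.append_assoc, List.drop_left, List.take_left]

theorem pv_scan_eq (name : String) (lens : PySem.Set Int)
    (hpos : ∀ L ∈ (lens : List Int), 0 < L) (cat : List String)
    (hcat : ∀ w ∈ cat, 0 < PySem.Str.len w → PySem.Str.len w ∈ (lens : List Int)) :
    pvScanB (pvSubs name lens) cat = pvScanA name cat := by
  induction cat with
  | nil => rfl
  | cons w rest ih =>
      have ih' := ih (fun v hv => hcat v (List.mem_cons_of_mem w hv))
      by_cases hw : 0 < PySem.Str.len w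
      · simp only [pvScanA, pvScanB, ih',
          pv_contains_subs name lens w hpos hw (hcat w List.mem_cons_self hw),
          Bool.and_comm]
      · simp only [pvScanA, pvScanB, ih', decide_eq_false hw, Bool.false_and,
          Bool.and_false]

-- ===== VERDICT (by name: the statement is the Claim_ definition above) =====
theorem name_cat_spec : Claim_equal_name_cat := by
  intro name bakery chilled beverages dairy fruit grains herbs meat nuts pantry _
  unfold Spec_name_cat name_cat name_cat_alt
  have hpos : ∀ L ∈ (pvLens [bakery, chilled, beverages, dairy, fruit, grains, herbs, meat, nuts, pantry] : List Int), 0 < L := by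
    intro L hL
    obtain ⟨_, _, _, _, hw, rfl⟩ := (pv_mem_lens _ L).mp hL
    exact hw
  have hscan : ∀ cat ∈ [bakery, chilled, beverages, dairy, fruit, grains, herbs, meat, nuts, pantry],
      pvScanB (pvSubs name (pvLens [bakery, chilled, beverages, dairy, fruit, grains, herbs, meat, nuts, pantry])) cat = pvScanA name cat := by
    intro cat hc
    exact pv_scan_eq name _ hpos cat
      (fun w hw hwpos => (pv_mem_lens _ _).mpr ⟨cat, hc, w, hw, hwpos, rfl⟩)
  have h0 := hscan bakery (by simp)
  have h1 := hscan chilled (by simp)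
  have h2 := hscan beverages (by simp)
  have h3 := hscan dairy (by simp)
  have h4 := hscan fruit (by simp)
  have h5 := hscan grains (by simp)
  have h6 := hscan herbs (by simp)
  have h7 := hscan meat (by simp)
  have h8 := hscan nuts (by simp)
  have h9 := hscan pantry (by simp)
  simp only [pvCatLoop, h0, h1, h2, h3, h4, h5, h6, h7, h8, h9]
  norm_num
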